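-- pv_equiv track=rewrite | github.com/hoolahola/Codejam | 2019/1A/A.py | Solve
-- ===== SOURCE A (Python) =====
-- def CalcCandidate(board, R, C, currRow, currCol):
--     candidate = []
--     for r in range(R):
--         for c in range(C):
--             if r == currRow:
--                 continue
--             if c == currCol:
--                 continue
--             if r - c == currRow - currCol:
--                 continue
--             if r + c == currRow + currCol:
--                 continue
--             if board[r][c] == 0:
--                 candidate.append((r, c))
--     return candidate
--
-- def Solve(R, C):
--     board = []
--     paths = []
--     candidate = []
--     currIndex = 0
--     for r in range(R):
--         col = []
--         for c in range(C):
--             col.append(0)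
--             candidate.append([])
--             paths.append((-1, -1))
--         board.append(col)
--
--     for r in range(R):
--         for c in range(C):
--             candidate[0].append((r, c))
--
--     result = True
--     while currIndex != R * C:
--         if len(candidate[currIndex]) == 0:
--             if currIndex == 0:
--                 result = False
--                 break
--             else:
--                 currIndex -= 1
--                 p = paths[currIndex]
--                 board[p[0]][p[1]] = 0
--         else:
--             p = candidate[currIndex].pop()
--             paths[currIndex] = p
--             board[p[0]][p[1]] = 1
--             currIndex += 1
--             if currIndex == R * C:
--                 break
--             else:
--                 candidate[currIndex] = CalcCandidate(board, R, C, p[0], p[1])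
--
--     resultStr = ""
--     if result:
--         resultStr += "POSSIBLE"
--         for p in paths:
--             resultStr += "\n" + str(p[0] + 1) + " " + str(p[1] + 1)
--     else:
--         resultStr += "IMPOSSIBLE"
--     return resultStr
-- ===== SOURCE B (Python) =====
-- def Solve(R, C):
--     board = [[0] * C for _ in range(R)]
--
--     def free_cells(last):
--         if last is None:
--             return [(r, c) for r in range(R) for c in range(C)]
--         lr, lc = last
--         return [(r, c) for r in range(R) for c in range(C)
--                 if r != lr and c != lc and r - c != lr - lc
--                 and r + c != lr + lc and board[r][c] == 0]
--
--     def place(last, remaining):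
--         if remaining <= 0:
--             return []
--         for p in reversed(free_cells(last)):
--             board[p[0]][p[1]] = 1
--             rest = place(p, remaining - 1)
--             board[p[0]][p[1]] = 0
--             if rest is not None:
--                 return [p] + rest
--         return None
--
--     tour = place(None, R * C)
--     if tour is None:
--         return "IMPOSSIBLE"
--     out = "POSSIBLE"
--     for r, c in tour:
--         out += "\n" + str(r + 1) + " " + str(c + 1)
--     return out
-- ===== Notes on version B (the rewrite author's own statement) =====
-- stated objective: simpler
-- what changed: Replaces A's explicit-stack while-loop backtracking over mutable candidate[]/paths[] arrays with a direct recursive depth-first search that returns the tour as a list, visiting candidates in reverse row-major order so the first tour found (and the output string) is identical.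
import Mathlib
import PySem

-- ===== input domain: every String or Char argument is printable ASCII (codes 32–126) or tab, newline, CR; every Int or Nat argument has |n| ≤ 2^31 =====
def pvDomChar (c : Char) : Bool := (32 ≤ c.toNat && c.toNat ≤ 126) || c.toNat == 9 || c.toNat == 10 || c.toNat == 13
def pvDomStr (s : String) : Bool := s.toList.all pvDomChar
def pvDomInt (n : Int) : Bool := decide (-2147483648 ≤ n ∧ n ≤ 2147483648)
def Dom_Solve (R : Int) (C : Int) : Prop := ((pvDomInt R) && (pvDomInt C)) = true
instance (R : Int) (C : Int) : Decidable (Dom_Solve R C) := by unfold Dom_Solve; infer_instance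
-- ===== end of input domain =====

-- B replaces A's explicit-stack while-loop backtracking with a recursive depth-first search
-- visiting candidates in reverse row-major order (same search tree, same output; objective: simpler).

-- ===== PORT A =====

-- board[r][c]  (indices always in range 0..R-1 / 0..C-1 where used; pyGetD is Python-exact there)
def getCell (b : List (List Int)) (r c : Int) : Int :=
  PySem.List.pyGetD (PySem.List.pyGetD b r []) c 0

-- board[r][c] = v  (in-range assignment; pySetD is Python-exact there)
def setCell (b : List (List Int)) (r c : Int) (v : Int) : List (List Int) :=
  PySem.List.pySetD b r (PySem.List.pySetD (PySem.List.pyGetD b r []) c v)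

def CalcCandidate (board : List (List Int)) (R C currRow currCol : Int) : List (Int × Int) :=
  (PySem.List.pyRange 0 R 1).foldl (fun cand r =>
    (PySem.List.pyRange 0 C 1).foldl (fun cand c =>
      if r == currRow then cand
      else if c == currCol then cand
      else if r - c == currRow - currCol then cand
      else if r + c == currRow + currCol then cand
      else if getCell board r c == 0 then cand ++ [(r, c)]
      else cand) cand) []

-- the while loop of A, with a fuel bound large enough to cover every iteration (proved below);
-- returns (result, paths) at the loop's exit
def loopA (R C : Int) : Nat → List (List Int) → List (Int × Int) → List (List (Int × Int)) → Int → Option (Bool × List (Int × Int))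
  | 0, _, _, _, _ => none
  | fuel + 1, board, paths, cand, currIndex =>
    if currIndex == R * C then some (true, paths)
    else
      let cur := PySem.List.pyGetD cand currIndex []
      if cur.length == 0 then
        if currIndex == 0 then some (false, paths)
        else
          let ci := currIndex - 1
          let p := PySem.List.pyGetD paths ci (-1, -1)
          loopA R C fuel (setCell board p.1 p.2 0) paths cand ci
      else
        match cur.getLast? with
        | none => none  -- unreachable: cur ≠ [] under the guard (candidate[currIndex].pop())
        | some p =>
          let cand1 := PySem.List.pySetD cand currIndex cur.dropLast
          let paths1 := PySem.List.pySetD paths currIndex p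
          let board1 := setCell board p.1 p.2 1
          if currIndex + 1 == R * C then some (true, paths1)
          else loopA R C fuel board1 paths1
                 (PySem.List.pySetD cand1 (currIndex + 1) (CalcCandidate board1 R C p.1 p.2))
                 (currIndex + 1)

-- fuel: strictly more than the loop-measure N*(N+2)^N of the initial state (N = R*C cells)
def fuelA (R C : Int) : Nat :=
  (R * C).toNat * ((R * C).toNat + 2) ^ (R * C).toNat + (R * C).toNat + 2

def Solve (R : Int) (C : Int) : String :=
  let init := (PySem.List.pyRange 0 R 1).foldl
      (fun (st : List (List Int) × List (List (Int × Int)) × List (Int × Int)) _r =>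
        let inner := (PySem.List.pyRange 0 C 1).foldl
            (fun (st2 : List Int × List (List (Int × Int)) × List (Int × Int)) _c =>
              (st2.1 ++ [(0 : Int)], st2.2.1 ++ [([] : List (Int × Int))], st2.2.2 ++ [((-1 : Int), (-1 : Int))]))
            (([] : List Int), st.2.1, st.2.2)
        (st.1 ++ [inner.1], inner.2.1, inner.2.2))
      (([], [], []) : List (List Int) × List (List (Int × Int)) × List (Int × Int))
  let board := init.1
  let cand0 := init.2.1
  let paths := init.2.2
  -- for r in range(R): for c in range(C): candidate[0].append((r, c))
  let cand := (PySem.List.pyRange 0 R 1).foldl (fun cd r =>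
      (PySem.List.pyRange 0 C 1).foldl (fun cd c =>
        PySem.List.pySetD cd 0 (PySem.List.pyGetD cd 0 [] ++ [(r, c)])) cd) cand0
  match loopA R C (fuelA R C) board paths cand 0 with
  | some (true, ps) =>
      -- resultStr = "" ; resultStr += "POSSIBLE" ; then the loop over paths
      ps.foldl (fun s p => s ++ "\n" ++ PySem.Int.toStr (p.1 + 1) ++ " " ++ PySem.Int.toStr (p.2 + 1)) "POSSIBLE"
  | some (false, _) => "IMPOSSIBLE"
  | none => "IMPOSSIBLE"  -- fuel exhausted: unreachable (fuelA exceeds the loop measure; proved below)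

-- ===== PORT B =====

-- free_cells(last): candidate cells in row-major order
def freeCells (board : List (List Int)) (R C : Int) (last : Option (Int × Int)) : List (Int × Int) :=
  match last with
  | none =>
    (PySem.List.pyRange 0 R 1).foldl (fun acc r =>
      (PySem.List.pyRange 0 C 1).foldl (fun acc c => acc ++ [(r, c)]) acc) []
  | some (lr, lc) =>
    (PySem.List.pyRange 0 R 1).foldl (fun acc r =>
      (PySem.List.pyRange 0 C 1).foldl (fun acc c =>
        if r != lr && c != lc && r - c != lr - lc && r + c != lr + lc && getCell board r c == 0
        then acc ++ [(r, c)] else acc) acc) []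

-- place(last, remaining) of Source B, split into the entry test (altPlace) and its for-loop (altTry);
-- altTry receives remaining - 1, the value Source B passes to the recursive call inside the loop.
-- Source B unmarks board[p] after the recursive call: with an immutable board the original `board`
-- used in the loop's next iteration plays that role.
mutual
def altPlace (R C : Int) (board : List (List Int)) (last : Option (Int × Int)) (remaining : Int) : Option (List (Int × Int)) :=
  if remaining ≤ 0 then some []
  else altTry R C board ((freeCells board R C last).reverse) (remaining - 1)
termination_by (remaining.toNat, 0)
decreasing_by simp only [Prod.lex_def]; omega

def altTry (R C : Int) (board : List (List Int)) (cands : List (Int × Int)) (rem1 : Int) : Option (List (Int × Int)) :=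
  match cands with
  | [] => none
  | p :: ps =>
    match altPlace R C (setCell board p.1 p.2 1) (some p) rem1 with
    | some rest => some (p :: rest)
    | none => altTry R C board ps rem1
termination_by (rem1.toNat, cands.length + 1)
decreasing_by all_goals simp [Prod.lex_def]
end

def Solve_alt (R : Int) (C : Int) : String :=
  -- board = [[0] * C for _ in range(R)]
  let board := (PySem.List.pyRange 0 R 1).foldl
      (fun b _r => b ++ [List.replicate C.toNat (0 : Int)]) []
  match altPlace R C board none (R * C) with
  | none => "IMPOSSIBLE"
  | some tour =>
      tour.foldl (fun s p => s ++ "\n" ++ PySem.Int.toStr (p.1 + 1) ++ " " ++ PySem.Int.toStr (p.2 + 1)) "POSSIBLE"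

-- ===== PRECONDITION & SPEC =====
-- Pre_ excludes exactly the inputs where A raises IndexError (candidate[0] on an empty candidate
-- list: a negative R or C together with R*C ≠ 0); A returns normally on every other input.
def Pre_Solve (R : Int) (C : Int) : Prop := R * C = 0 ∨ (0 < R ∧ 0 < C)
instance (R : Int) (C : Int) : Decidable (Pre_Solve R C) := by unfold Pre_Solve; infer_instance

def pvWitness_Solve : Int × Int := (2, 3)

def Spec_Solve (R : Int) (C : Int) (out : String) : Prop := out = Solve_alt R C
instance (R : Int) (C : Int) (out : String) : Decidable (Spec_Solve R C out) := by unfold Spec_Solve; infer_instance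

-- ===== CLAIM (what is proved, stated in full; the proofs are below) =====
def Claim_equal_Solve : Prop := ∀ (R : Int) (C : Int), Dom_Solve R C → Pre_Solve R C → Spec_Solve R C (Solve R C)

-- ===== LEMMAS AND PROOFS =====

def cellOK (R C : Int) (p : Int × Int) : Prop :=
  0 ≤ p.1 ∧ p.1 < R ∧ 0 ≤ p.2 ∧ p.2 < C

def dims (R C : Int) (b : List (List Int)) : Prop :=
  b.length = R.toNat ∧ ∀ row ∈ b, row.length = C.toNat

lemma getD_set' {α : Type} (l : List α) (n m : Nat) (x : α) (d : α) :
    (l.set n x).getD m d = if m = n ∧ n < l.length then x else l.getD m d := by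
  simp [List.getD_eq_getElem?_getD, List.getElem?_set]
  split_ifs with h1 h2 h3 <;> simp_all

lemma dims_rowLen (R C : Int) (b : List (List Int)) (n : Nat)
    (hb : dims R C b) (hn : n < b.length) :
    (b.getD n []).length = C.toNat := by
  rw [List.getD_eq_getElem _ _ hn]
  exact hb.2 _ (List.getElem_mem hn)

lemma getCell_eq (b : List (List Int)) (r c : Int)
    (hr : 0 ≤ r) (hc : 0 ≤ c) :
    getCell b r c = (b.getD r.toNat []).getD c.toNat 0 := by
  unfold getCell
  rw [PySem.List.pyGetD_of_nonneg _ _ hr, PySem.List.pyGetD_of_nonneg _ _ hc]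

lemma setCell_eq (b : List (List Int)) (r c : Int) (v : Int)
    (hr : 0 ≤ r) (hc : 0 ≤ c) :
    setCell b r c v = b.set r.toNat ((b.getD r.toNat []).set c.toNat v) := by
  unfold setCell
  rw [PySem.List.pySetD_of_nonneg _ _ hr, PySem.List.pySetD_of_nonneg _ _ hc,
    PySem.List.pyGetD_of_nonneg _ _ hr]

lemma dims_setCell (R C : Int) (b : List (List Int)) (r c v : Int)
    (hb : dims R C b) (hr : 0 ≤ r) (hc : 0 ≤ c) :
    dims R C (setCell b r c v) := by
  rw [setCell_eq b r c v hr hc]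
  by_cases hin : r.toNat < b.length
  · refine ⟨by simpa using hb.1, ?_⟩
    intro row hmem
    rcases List.mem_or_eq_of_mem_set hmem with h | h
    · exact hb.2 _ h
    · subst h
      rw [List.length_set]
      exact dims_rowLen R C b _ hb hin
  · rw [List.set_eq_of_length_le (by omega)]
    exact hb

lemma setCell_cancel (R C : Int) (b : List (List Int)) (r c : Int)
    (hb : dims R C b) (h : cellOK R C (r, c)) (h0 : getCell b r c = 0) :
    setCell (setCell b r c 1) r c 0 = b := by
  obtain ⟨h1, h2, h3, h4⟩ := h
  have hrn : r.toNat < b.length := by obtain ⟨hl, _⟩ := hb; omega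
  have hcn : c.toNat < (b.getD r.toNat []).length := by
    rw [dims_rowLen R C b _ hb hrn]; omega
  rw [getCell_eq _ _ _ h1 h3] at h0
  rw [setCell_eq b r c 1 h1 h3, setCell_eq _ r c 0 h1 h3, getD_set',
    if_pos ⟨rfl, hrn⟩, List.set_set, List.set_set]
  have : ((b.getD r.toNat []).set c.toNat 0) = b.getD r.toNat [] := by
    rw [← h0] at *
    rw [List.getD_eq_getElem _ _ hcn] at *
    exact List.set_getElem_self hcn
  rw [this, List.getD_eq_getElem _ _ hrn, List.set_getElem_self hrn]

def allCells (R C : Int) : List (Int × Int) :=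
  (PySem.List.pyRange 0 R 1).flatMap (fun r => (PySem.List.pyRange 0 C 1).map (fun c => (r, c)))

def candPred (board : List (List Int)) (lr lc : Int) (p : Int × Int) : Bool :=
  p.1 != lr && p.2 != lc && p.1 - p.2 != lr - lc && p.1 + p.2 != lr + lc &&
    getCell board p.1 p.2 == 0

lemma freeCells_none (board : List (List Int)) (R C : Int) :
    freeCells board R C none = allCells R C := by
  show (PySem.List.pyRange 0 R 1).foldl _ [] = _
  have hf : (fun (acc : List (Int × Int)) (r : Int) =>
      (PySem.List.pyRange 0 C 1).foldl (fun acc c => acc ++ [(r, c)]) acc)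
      = fun acc r => acc ++ (PySem.List.pyRange 0 C 1).map (fun c => (r, c)) := by
    funext acc r
    exact PySem.List.foldl_append_singleton_eq_map _ _ _
  rw [hf, PySem.List.foldl_append_eq_flatMap]
  rfl

lemma freeCells_some (board : List (List Int)) (R C lr lc : Int) :
    freeCells board R C (some (lr, lc)) = (allCells R C).filter (candPred board lr lc) := by
  show (PySem.List.pyRange 0 R 1).foldl _ [] = _
  have hf : (fun (acc : List (Int × Int)) (r : Int) =>
      (PySem.List.pyRange 0 C 1).foldl (fun acc c =>
        if r != lr && c != lc && r - c != lr - lc && r + c != lr + lc && getCell board r c == 0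
        then acc ++ [(r, c)] else acc) acc)
      = fun acc r => acc ++
          ((PySem.List.pyRange 0 C 1).filter (fun c => candPred board lr lc (r, c))).map
            (fun c => (r, c)) := by
    funext acc r
    exact PySem.List.foldl_append_if (fun c => candPred board lr lc (r, c)) (fun c => (r, c)) _ _
  rw [hf, PySem.List.foldl_append_eq_flatMap]
  unfold allCells
  simp only [List.nil_append]
  rw [List.filter_flatMap]
  congr 1
  funext r
  have := List.filter_map (f := fun c : Int => (r, c)) (l := PySem.List.pyRange 0 C 1) (p := candPred board lr lc)
  simp only [Function.comp_def] at this
  exact this.symm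

lemma CalcCandidate_eq (board : List (List Int)) (R C a b : Int) :
    CalcCandidate board R C a b = (allCells R C).filter (candPred board a b) := by
  unfold CalcCandidate
  rw [← freeCells_some board R C a b]
  show _ = (PySem.List.pyRange 0 R 1).foldl _ []
  have hf : (fun (cand : List (Int × Int)) (r : Int) =>
      (PySem.List.pyRange 0 C 1).foldl (fun cand c =>
        if r == a then cand
        else if c == b then cand
        else if r - c == a - b then cand
        else if r + c == a + b then cand
        else if getCell board r c == 0 then cand ++ [(r, c)]
        else cand) cand)
      = fun cand r => (PySem.List.pyRange 0 C 1).foldl (fun cand c =>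
        if r != a && c != b && r - c != a - b && r + c != a + b && getCell board r c == 0
        then cand ++ [(r, c)] else cand) cand := by
    funext cand r
    congr 1
    funext cand c
    by_cases h1 : r = a <;> by_cases h2 : c = b <;>
      by_cases h3 : r - c = a - b <;> by_cases h4 : r + c = a + b <;>
      by_cases h5 : getCell board r c = 0 <;>
      simp [h1, h2, h3, h4, h5]
  rw [hf]

lemma CalcCandidate_eq_freeCells (board : List (List Int)) (R C a b : Int) :
    CalcCandidate board R C a b = freeCells board R C (some (a, b)) := by
  rw [CalcCandidate_eq, freeCells_some]

lemma mem_allCells (R C : Int) (p : Int × Int) :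
    p ∈ allCells R C ↔ cellOK R C p := by
  unfold allCells cellOK
  simp only [List.mem_flatMap, List.mem_map, PySem.List.mem_pyRange_one]
  constructor
  · rintro ⟨r, ⟨hr0, hr1⟩, c, ⟨hc0, hc1⟩, rfl⟩; exact ⟨hr0, hr1, hc0, hc1⟩
  · rintro ⟨h1, h2, h3, h4⟩; exact ⟨p.1, ⟨h1, h2⟩, p.2, ⟨h3, h4⟩, rfl⟩

lemma length_allCells (R C : Int) : (allCells R C).length = R.toNat * C.toNat := by
  unfold allCells
  rw [List.length_flatMap]
  simp only [List.length_map, PySem.List.length_pyRange_one]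
  rw [List.map_const', List.sum_replicate, smul_eq_mul,
    PySem.List.length_pyRange_one]
  simp

lemma length_CalcCandidate_le (board : List (List Int)) (R C a b : Int) :
    (CalcCandidate board R C a b).length ≤ R.toNat * C.toNat := by
  rw [CalcCandidate_eq, ← length_allCells R C]
  exact List.length_filter_le _ _

lemma mem_CalcCandidate (board : List (List Int)) (R C a b : Int) (q : Int × Int)
    (h : q ∈ CalcCandidate board R C a b) :
    cellOK R C q ∧ getCell board q.1 q.2 = 0 := by
  rw [CalcCandidate_eq] at h
  have h1 := List.of_mem_filter h
  have h2 := List.mem_of_mem_filter h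
  rw [mem_allCells] at h2
  refine ⟨h2, ?_⟩
  unfold candPred at h1
  simp only [Bool.and_eq_true, beq_iff_eq] at h1
  exact h1.2

lemma foldl_triple_chunks {α β γ δ : Type} (l : List δ) (wx : List α) (wy : List β) (wz : List γ) :
    ∀ s : List α × List β × List γ,
      l.foldl (fun st _ => (st.1 ++ wx, st.2.1 ++ wy, st.2.2 ++ wz)) s
        = (s.1 ++ (List.replicate l.length wx).flatten,
           s.2.1 ++ (List.replicate l.length wy).flatten,
           s.2.2 ++ (List.replicate l.length wz).flatten) := by
  induction l with
  | nil => intro s; simp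
  | cons x xs ih =>
    intro s
    rw [List.foldl_cons, ih]
    simp [List.replicate_succ, List.append_assoc]

lemma A_init_eq (R C : Int) :
    ((PySem.List.pyRange 0 R 1).foldl
      (fun (st : List (List Int) × List (List (Int × Int)) × List (Int × Int)) _r =>
        let inner := (PySem.List.pyRange 0 C 1).foldl
            (fun (st2 : List Int × List (List (Int × Int)) × List (Int × Int)) _c =>
              (st2.1 ++ [(0 : Int)], st2.2.1 ++ [([] : List (Int × Int))], st2.2.2 ++ [((-1 : Int), (-1 : Int))]))
            (([] : List Int), st.2.1, st.2.2)
        (st.1 ++ [inner.1], inner.2.1, inner.2.2))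
      (([], [], []) : List (List Int) × List (List (Int × Int)) × List (Int × Int)))
    = (List.replicate R.toNat (List.replicate C.toNat (0 : Int)),
       List.replicate (R.toNat * C.toNat) ([] : List (Int × Int)),
       List.replicate (R.toNat * C.toNat) ((-1 : Int), (-1 : Int))) := by
  have hstep : (fun (st : List (List Int) × List (List (Int × Int)) × List (Int × Int)) (_r : Int) =>
        let inner := (PySem.List.pyRange 0 C 1).foldl
            (fun (st2 : List Int × List (List (Int × Int)) × List (Int × Int)) _c =>
              (st2.1 ++ [(0 : Int)], st2.2.1 ++ [([] : List (Int × Int))], st2.2.2 ++ [((-1 : Int), (-1 : Int))]))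
            (([] : List Int), st.2.1, st.2.2)
        (st.1 ++ [inner.1], inner.2.1, inner.2.2))
      = fun st _r => (st.1 ++ [List.replicate C.toNat (0 : Int)],
          st.2.1 ++ List.replicate C.toNat ([] : List (Int × Int)),
          st.2.2 ++ List.replicate C.toNat ((-1 : Int), (-1 : Int))) := by
    funext st _r
    show (_, _, _) = _
    rw [foldl_triple_chunks]
    simp [PySem.List.length_pyRange_one]
  rw [hstep, foldl_triple_chunks]
  simp [PySem.List.length_pyRange_one, List.flatten_replicate_replicate]

lemma B_board_eq (R C : Int) :
    ((PySem.List.pyRange 0 R 1).foldl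
      (fun (b : List (List Int)) _r => b ++ [List.replicate C.toNat (0 : Int)]) [])
    = List.replicate R.toNat (List.replicate C.toNat (0 : Int)) := by
  rw [PySem.List.foldl_append_singleton_eq_map (fun _ => List.replicate C.toNat (0 : Int))]
  simp [List.map_const', PySem.List.length_pyRange_one]

lemma dims_board0 (R C : Int) :
    dims R C (List.replicate R.toNat (List.replicate C.toNat (0 : Int))) := by
  constructor
  · simp
  · intro row hrow
    simp_all [List.eq_of_mem_replicate hrow]

lemma getCell_board0 (R C r c : Int) (h : cellOK R C (r, c)) :
    getCell (List.replicate R.toNat (List.replicate C.toNat (0 : Int))) r c = 0 := by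
  obtain ⟨h1, h2, h3, h4⟩ := h
  rw [getCell_eq _ _ _ h1 h3]
  simp only [List.getD_eq_getElem?_getD, List.getElem?_replicate]
  split_ifs <;> simp_all

-- the candidate[0]-filling loop, as a fold over the flattened cell list
lemma fill_fold_eq (R C : Int) (cand : List (List (Int × Int))) (h : 0 < cand.length) :
    ((PySem.List.pyRange 0 R 1).foldl (fun cd r =>
      (PySem.List.pyRange 0 C 1).foldl (fun cd c =>
        PySem.List.pySetD cd 0 (PySem.List.pyGetD cd 0 [] ++ [(r, c)])) cd) cand)
    = cand.set 0 (cand.getD 0 [] ++ allCells R C) := by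
  have hflat : ((allCells R C).foldl (fun cd rc =>
      PySem.List.pySetD cd 0 (PySem.List.pyGetD cd 0 [] ++ [rc])) cand)
      = (PySem.List.pyRange 0 R 1).foldl (fun cd r =>
        (PySem.List.pyRange 0 C 1).foldl (fun cd c =>
          PySem.List.pySetD cd 0 (PySem.List.pyGetD cd 0 [] ++ [(r, c)])) cd) cand := by
    unfold allCells
    rw [List.foldl_flatMap]
    congr 1
    funext cd r
    rw [List.foldl_map]
  rw [← hflat]
  -- now a single fold over the cell list; induct
  have main : ∀ (l : List (Int × Int)) (cd : List (List (Int × Int))) (acc : List (Int × Int)),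
      0 < cd.length → cd.getD 0 [] = acc →
      (l.foldl (fun cd rc => PySem.List.pySetD cd 0 (PySem.List.pyGetD cd 0 [] ++ [rc])) cd)
        = cd.set 0 (acc ++ l) := by
    intro l
    induction l with
    | nil =>
      intro cd acc hlen hacc
      subst hacc
      cases cd with
      | nil => simp at hlen
      | cons a t => simp
    | cons x xs ih =>
      intro cd acc hlen hacc
      rw [List.foldl_cons]
      have hset : PySem.List.pySetD cd 0 (PySem.List.pyGetD cd 0 [] ++ [x])
          = cd.set 0 (acc ++ [x]) := by
        rw [PySem.List.pySetD_of_nonneg _ _ (by norm_num), PySem.List.pyGetD_zero, hacc]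
        rfl
      rw [hset, ih _ (acc ++ [x]) (by simpa using hlen)
        (by rw [getD_set', if_pos ⟨rfl, by omega⟩]),
        List.set_set, List.append_assoc]
      rfl
  exact main _ _ _ h rfl

-- the stack invariant: cells of the current candidate list are free in-range cells,
-- and recursively so after unplacing each stacked cell
def StackInv (R C : Int) : List (List Int) → List ((Int × Int) × List (Int × Int)) → List (Int × Int) → Prop
  | board, [], c => ∀ p ∈ c, cellOK R C p ∧ getCell board p.1 p.2 = 0
  | board, (q, c') :: rest, c =>
      (∀ p ∈ c, cellOK R C p ∧ getCell board p.1 p.2 = 0) ∧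
      cellOK R C q ∧ StackInv R C (setCell board q.1 q.2 0) rest c'

-- what the rest of A's loop computes, phrased through B's altTry
def specLoop (R C : Int) : List (List Int) → List ((Int × Int) × List (Int × Int)) → List (Int × Int) → Int → Option (List (Int × Int))
  | board, below, c, rem =>
    match altTry R C board c.reverse (rem - 1) with
    | some t => some ((below.map Prod.fst).reverse ++ t)
    | none =>
      match below with
      | [] => none
      | (q, c') :: rest => specLoop R C (setCell board q.1 q.2 0) rest c' (rem + 1)

lemma altTry_nil (R C : Int) (board : List (List Int)) (rem1 : Int) :
    altTry R C board [] rem1 = none := by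
  rw [altTry]

lemma altTry_cons (R C : Int) (board : List (List Int)) (p : Int × Int)
    (ps : List (Int × Int)) (rem1 : Int) :
    altTry R C board (p :: ps) rem1
      = match altPlace R C (setCell board p.1 p.2 1) (some p) rem1 with
        | some rest => some (p :: rest)
        | none => altTry R C board ps rem1 := by
  rw [altTry]

lemma specLoop_nil_nil (R C : Int) (board : List (List Int)) (rem : Int) :
    specLoop R C board [] [] rem = none := by
  rw [specLoop.eq_def]
  dsimp only
  simp [altTry_nil]

lemma specLoop_cons_nil (R C : Int) (board : List (List Int))
    (q : Int × Int) (c' : List (Int × Int)) (rest : List ((Int × Int) × List (Int × Int))) (rem : Int) :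
    specLoop R C board ((q, c') :: rest) [] rem
      = specLoop R C (setCell board q.1 q.2 0) rest c' (rem + 1) := by
  rw [specLoop.eq_def]
  dsimp only
  simp [altTry_nil]

lemma reverse_eq_getLast_cons (c : List (Int × Int)) (hc : c ≠ []) :
    c.reverse = c.getLast hc :: c.dropLast.reverse := by
  conv_lhs => rw [← List.dropLast_append_getLast hc]
  simp

lemma specLoop_success (R C : Int) (board : List (List Int))
    (below : List ((Int × Int) × List (Int × Int))) (c : List (Int × Int)) (rem : Int)
    (hc : c ≠ []) (hrem : rem - 1 ≤ 0) :
    specLoop R C board below c rem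
      = some ((below.map Prod.fst).reverse ++ [c.getLast hc]) := by
  rw [specLoop.eq_def]
  dsimp only
  rw [reverse_eq_getLast_cons c hc, altTry_cons]
  rw [altPlace, if_pos hrem]

lemma specLoop_pop (R C : Int) (board : List (List Int))
    (below : List ((Int × Int) × List (Int × Int))) (c : List (Int × Int)) (rem : Int)
    (hc : c ≠ []) (hrem : ¬ (rem - 1 ≤ 0))
    (hdims : dims R C board)
    (hcell : cellOK R C (c.getLast hc))
    (hzero : getCell board (c.getLast hc).1 (c.getLast hc).2 = 0) :
    specLoop R C board below c rem
      = specLoop R C (setCell board (c.getLast hc).1 (c.getLast hc).2 1)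
          ((c.getLast hc, c.dropLast) :: below)
          (CalcCandidate (setCell board (c.getLast hc).1 (c.getLast hc).2 1) R C
            (c.getLast hc).1 (c.getLast hc).2)
          (rem - 1) := by
  set p := c.getLast hc with hp
  have hrev : c.reverse = p :: c.dropLast.reverse := reverse_eq_getLast_cons c hc
  set board1 := setCell board p.1 p.2 1 with hb1
  have hfree : (freeCells board1 R C (some p)).reverse
      = (CalcCandidate board1 R C p.1 p.2).reverse := by
    rw [CalcCandidate_eq_freeCells]
  conv_lhs => rw [specLoop.eq_def]
  conv_rhs => rw [specLoop.eq_def]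
  dsimp only
  rw [hrev, altTry_cons, altPlace, if_neg hrem]
  rw [show (freeCells board1 R C (some p)).reverse = (CalcCandidate board1 R C p.1 p.2).reverse
      from by rw [CalcCandidate_eq_freeCells]]
  have hr1 : rem - 1 + 1 = rem := by omega
  have hcancel : setCell board1 p.1 p.2 0 = board := by
    rw [hb1]
    exact setCell_cancel R C board p.1 p.2 hdims (by simpa using hcell) hzero
  cases h : altTry R C board1 (CalcCandidate board1 R C p.1 p.2).reverse (rem - 1 - 1) with
  | some t0 =>
    simp
  | none =>
    simp only [hcancel, hr1]
    conv_rhs => rw [specLoop.eq_def]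

-- loop measure: position-weighted total size of the candidate stacks plus the level
def muW (N i : Nat) : Nat := (N + 2) ^ (N - i)

def mu (N : Nat) (cand : List (List (Int × Int))) (k : Nat) : Nat :=
  k + ∑ i ∈ Finset.range N, (cand.getD i []).length * muW N i

lemma sum_set_cand (N j : Nat) (cand : List (List (Int × Int))) (x : List (Int × Int))
    (hj : j < N) (hjl : j < cand.length) :
    (∑ i ∈ Finset.range N, ((cand.set j x).getD i []).length * muW N i)
      + (cand.getD j []).length * muW N j
    = (∑ i ∈ Finset.range N, (cand.getD i []).length * muW N i) + x.length * muW N j := by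
  have hjm : j ∈ Finset.range N := Finset.mem_range.mpr hj
  rw [← Finset.add_sum_erase _ _ hjm, ← Finset.add_sum_erase _ (fun i => (cand.getD i []).length * muW N i) hjm]
  have hrest : ∑ i ∈ (Finset.range N).erase j, ((cand.set j x).getD i []).length * muW N i
      = ∑ i ∈ (Finset.range N).erase j, (cand.getD i []).length * muW N i := by
    apply Finset.sum_congr rfl
    intro i hi
    rw [getD_set', if_neg (by simp at hi; tauto)]
  rw [hrest, getD_set', if_pos ⟨rfl, hjl⟩]
  ring

lemma mu_pop (N k : Nat) (cand : List (List (Int × Int))) (c newc : List (Int × Int))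
    (hk1 : k + 1 < N) (hcl : cand.length = N) (hck : cand.getD k [] = c)
    (hcne : c ≠ []) (hnew : newc.length ≤ N) :
    mu N ((cand.set k c.dropLast).set (k + 1) newc) (k + 1) < mu N cand k := by
  have hcpos : 0 < c.length := List.length_pos_iff.mpr hcne
  set S := ∑ i ∈ Finset.range N, (cand.getD i []).length * muW N i with hS
  set cand1 := cand.set k c.dropLast with hc1
  set S1 := ∑ i ∈ Finset.range N, ((cand1).getD i []).length * muW N i with hS1
  set S2 := ∑ i ∈ Finset.range N, ((cand1.set (k+1) newc).getD i []).length * muW N i with hS2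
  have A1 := sum_set_cand N k cand c.dropLast (by omega) (by omega)
  have A2 := sum_set_cand N (k+1) cand1 newc (by omega) (by simp [hc1]; omega)
  rw [← hS, ← hS1] at A1
  rw [← hS1, ← hS2] at A2
  rw [hck] at A1
  have hd : c.dropLast.length = c.length - 1 := by simp
  have hw : muW N k = (N + 2) * muW N (k + 1) := by
    unfold muW
    rw [show N - k = (N - (k+1)) + 1 by omega, pow_succ]
    ring
  have hsplit : c.length * muW N k = (c.length - 1) * muW N k + muW N k := by
    have h1 : c.length = (c.length - 1) + 1 := by omega
    conv_lhs => rw [h1]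
    rw [Nat.succ_mul]
  -- S1 + muW N k = S
  have e1 : S1 + muW N k = S := by
    rw [hd] at A1
    linarith [A1, hsplit]
  have hck1 : cand1.getD (k+1) [] = cand.getD (k+1) [] := by
    rw [hc1, getD_set', if_neg (by omega)]
  have hnewle : newc.length * muW N (k+1) ≤ N * muW N (k+1) :=
    Nat.mul_le_mul_right _ hnew
  have hwpos : 0 < muW N (k + 1) := pow_pos (by omega : 0 < N + 2) _
  -- S2 ≤ S1 + N * muW N (k+1) and muW N k = (N+2) * wt(k+1)
  have e2 : S2 + (cand.getD (k+1) []).length * muW N (k+1) = S1 + newc.length * muW N (k+1) := by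
    rw [← hck1]; exact A2
  unfold mu
  rw [← hS, ← hS2]
  -- μ' = (k+1) + S2 ; μ = k + S ; suffices S2 + 2 ≤ S
  have key : S2 + 2 * muW N (k + 1) ≤ S := by
    have : S2 ≤ S1 + N * muW N (k+1) := by omega
    have hS1' : S1 + (N + 2) * muW N (k+1) = S := by rw [← hw]; exact e1
    nlinarith
  omega

lemma take_concat_getD (paths : List (Int × Int)) (k : Nat) (xs : List (Int × Int)) (q : Int × Int)
    (h : paths.take k = xs ++ [q]) (hk : k ≤ paths.length) (hxs : xs.length = k - 1) (hk0 : 0 < k) :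
    paths.getD (k - 1) (-1, -1) = q := by
  have hlen : (paths.take k).length = k := by simp; omega
  have : (paths.take k).getD (k - 1) (-1, -1) = paths.getD (k - 1) (-1, -1) := by
    rw [List.getD_eq_getElem _ _ (by omega), List.getD_eq_getElem _ _ (by omega)]
    rw [List.getElem_take]
  rw [← this, h]
  rw [List.getD_eq_getElem _ _ (by simp; omega)]
  rw [List.getElem_append_right (by omega)]
  simp [hxs]

lemma concat_getD_len {α : Type} (xs : List α) (y : α) (d : α) :
    (xs ++ [y]).getD xs.length d = y := by
  simp

lemma set_take_succ (paths : List (Int × Int)) (k : Nat) (p : Int × Int) (hk : k < paths.length) :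
    (paths.set k p).take (k + 1) = paths.take k ++ [p] := by
  rw [List.set_eq_take_cons_drop p hk, List.take_append]
  have h1 : (paths.take k).length = k := by simp; omega
  rw [List.take_of_length_le (by omega), h1]
  simp

-- the main simulation: from any reachable loop state, A's loop computes what specLoop says
lemma sim (R C : Int) (N : Nat) (hR : 0 < R) (hC : 0 < C) (hN : (N : Int) = R * C) :
    ∀ (f : Nat) (k : Nat) (board : List (List Int)) (paths : List (Int × Int))
      (cand : List (List (Int × Int))) (below : List ((Int × Int) × List (Int × Int)))
      (c : List (Int × Int)),
      mu N cand k < f → k < N →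
      dims R C board → StackInv R C board below c →
      cand.length = N → paths.length = N →
      cand.getD k [] = c → below.length = k →
      (∀ i, i < k → cand.getD i [] = ((below.map Prod.snd).reverse).getD i []) →
      paths.take k = (below.map Prod.fst).reverse →
      (match specLoop R C board below c ((N : Int) - k) with
       | some t => loopA R C f board paths cand (k : Int) = some (true, t)
       | none => ∃ ps, loopA R C f board paths cand (k : Int) = some (false, ps)) := by
  intro f
  induction f with
  | zero => intro k _ _ cand _ _ hμ _ _ _ _ _ _ _ _ _; omega
  | succ f ih =>
    intro k board paths cand below c hμ hk hdims hinv hcl hpl hck hbl hbi hbp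
    have hkne : (((k : Nat) : Int) == R * C) = false := by
      simp only [beq_eq_false_iff_ne, ne_eq]
      omega
    rw [loopA]
    rw [hkne]
    simp only [Bool.false_eq_true, if_false]
    have hcur : PySem.List.pyGetD cand ((k : Nat) : Int) [] = c := by
      rw [PySem.List.pyGetD_natCast]; exact hck
    rw [hcur]
    by_cases hcnil : c = []
    · -- empty candidate list: backtrack or fail
      subst hcnil
      simp only [List.length_nil, beq_self_eq_true, if_true]
      by_cases hk0 : k = 0
      · subst hk0
        have hb0 : below = [] := by
          cases below with
          | nil => rfl
          | cons a b => simp at hbl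
        subst hb0
        rw [specLoop_nil_nil]
        exact ⟨paths, by norm_num⟩
      · cases below with
        | nil => simp at hbl; omega
        | cons qc rest =>
          obtain ⟨q, c'⟩ := qc
          have hq0 : ((k : Nat) : Int) ≠ 0 := by omega
          rw [if_neg (by simpa using hq0)]
          obtain ⟨hcells, hqOK, hinv'⟩ := hinv
          have hklen : rest.length = k - 1 := by simp at hbl; omega
          have hprefix : paths.take k = (rest.map Prod.fst).reverse ++ [q] := by
            simpa using hbp
          have hgetq : PySem.List.pyGetD paths (((k : Nat) : Int) - 1) (-1, -1) = q := by
            rw [show (((k : Nat) : Int) - 1) = (((k - 1 : Nat) : Nat) : Int) by omega,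
              PySem.List.pyGetD_natCast]
            exact take_concat_getD paths k _ q hprefix (by omega) (by simpa using hklen) (by omega)
          rw [hgetq]
          have hcast : ((k : Nat) : Int) - 1 = (((k - 1 : Nat) : Nat) : Int) := by omega
          rw [hcast]
          have hμ' : mu N cand (k - 1) < f := by
            unfold mu at hμ ⊢; omega
          have hrem : (N : Int) - ((k - 1 : Nat) : Int) = ((N : Int) - k) + 1 := by omega
          have := ih (k - 1) (setCell board q.1 q.2 0) paths cand rest c' hμ' (by omega)
            (dims_setCell R C board q.1 q.2 0 hdims hqOK.1 hqOK.2.2.1) hinv'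
            hcl hpl
            (by rw [hbi (k - 1) (by omega)]
                simp only [List.map_cons, List.reverse_cons]
                rw [show k - 1 = ((rest.map Prod.snd).reverse).length from by simp [hklen]]
                exact concat_getD_len _ _ _)
            (by omega)
            (by intro i hi
                rw [hbi i (by omega)]
                simp only [List.map_cons, List.reverse_cons]
                rw [List.getD_append _ _ _ _ (by simp; omega)])
            (by have h1 : paths.take (k - 1) = (paths.take k).take (k - 1) := by
                  rw [List.take_take]; congr 1; omega
                rw [h1, hbp]
                simp only [List.map_cons, List.reverse_cons]
                exact List.take_left' (by simp [hklen]))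
          rw [specLoop_cons_nil]
          rw [hrem] at this
          exact this
    · -- pop branch
      have hlen0 : (c.length == 0) = false := by
        simp only [beq_eq_false_iff_ne, ne_eq]
        simpa using hcnil
      rw [hlen0]
      simp only [Bool.false_eq_true, if_false]
      have hlast : c.getLast? = some (c.getLast hcnil) := List.getLast?_eq_some_getLast hcnil
      rw [hlast]
      set p := c.getLast hcnil with hp
      have hpmem : p ∈ c := List.getLast_mem hcnil
      have hpfacts : cellOK R C p ∧ getCell board p.1 p.2 = 0 := by
        cases below with
        | nil => exact hinv p hpmem
        | cons qc rest => exact hinv.1 p hpmem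
      by_cases hk1 : k + 1 = N
      · -- success exit
        have hk1' : (((k : Nat) : Int) + 1 == R * C) = true := by
          simp only [beq_iff_eq]; omega
        rw [hk1']
        simp only [if_true]
        have hrem1 : ((N : Int) - k) - 1 ≤ 0 := by omega
        rw [specLoop_success R C board below c _ hcnil hrem1]
        have hpaths : PySem.List.pySetD paths ((k : Nat) : Int) p
            = (below.map Prod.fst).reverse ++ [p] := by
          rw [PySem.List.pySetD_natCast]
          rw [List.set_eq_take_cons_drop p (by omega)]
          rw [List.drop_eq_nil_of_le (by omega), hbp]
        rw [hpaths]
      · -- push and recurse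
        have hk1' : (((k : Nat) : Int) + 1 == R * C) = false := by
          simp only [beq_eq_false_iff_ne, ne_eq]; omega
        rw [hk1']
        simp only [Bool.false_eq_true, if_false]
        set board1 := setCell board p.1 p.2 1 with hb1
        set newc := CalcCandidate board1 R C p.1 p.2 with hnewc
        have hreml : ¬ ((N : Int) - k) - 1 ≤ 0 := by omega
        rw [specLoop_pop R C board below c _ hcnil hreml hdims hpfacts.1 hpfacts.2]
        have hcast1 : ((k : Nat) : Int) + 1 = (((k + 1 : Nat) : Nat) : Int) := by omega
        rw [hcast1]
        have hsets : PySem.List.pySetD (PySem.List.pySetD cand ((k : Nat) : Int) c.dropLast)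
            (((k + 1 : Nat) : Nat) : Int) newc
            = (cand.set k c.dropLast).set (k + 1) newc := by
          rw [PySem.List.pySetD_natCast, PySem.List.pySetD_natCast]
        have hpaths1 : PySem.List.pySetD paths ((k : Nat) : Int) p = paths.set k p := by
          rw [PySem.List.pySetD_natCast]
        rw [hsets, hpaths1]
        set cand2 := (cand.set k c.dropLast).set (k + 1) newc with hc2
        have hbelOK : StackInv R C board below c.dropLast := by
          cases below with
          | nil =>
            intro q hq
            exact hinv q (List.mem_of_mem_dropLast hq)
          | cons qc rest =>
            exact ⟨fun q hq => hinv.1 q (List.mem_of_mem_dropLast hq), hinv.2⟩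
        have hinv2 : StackInv R C board1 ((p, c.dropLast) :: below) newc := by
          refine ⟨?_, hpfacts.1, ?_⟩
          · intro q hq
            exact mem_CalcCandidate board1 R C p.1 p.2 q (hnewc ▸ hq)
          · rw [hb1, setCell_cancel R C board p.1 p.2 hdims hpfacts.1 hpfacts.2]
            exact hbelOK
        have hμ2 : mu N cand2 (k + 1) < f := by
          have := mu_pop N k cand c newc (by omega) hcl hck hcnil
            (by rw [hnewc]
                have := length_CalcCandidate_le board1 R C p.1 p.2
                have hNRC : R.toNat * C.toNat = N := by
                  have hcast : ((R.toNat * C.toNat : Nat) : Int) = R * C := by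
                    rw [Nat.cast_mul, Int.toNat_of_nonneg hR.le, Int.toNat_of_nonneg hC.le]
                  rw [← hN] at hcast
                  exact_mod_cast hcast
                omega)
          rw [← hc2] at this
          omega
        have := ih (k + 1) board1 (paths.set k p) cand2 ((p, c.dropLast) :: below) newc
          hμ2 (by omega)
          (by rw [hb1]; exact dims_setCell R C board p.1 p.2 1 hdims hpfacts.1.1 hpfacts.1.2.2.1)
          hinv2
          (by simp [hc2, hcl])
          (by simp [hpl])
          (by rw [hc2, getD_set', if_pos ⟨rfl, by simp [hcl]; omega⟩])
          (by simp [hbl])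
          (by intro i hi
              rw [hc2]
              simp only [List.map_cons, List.reverse_cons]
              by_cases hik : i = k
              · subst hik
                rw [getD_set', if_neg (by omega), getD_set', if_pos ⟨rfl, by omega⟩]
                rw [List.getD_append_right _ _ _ _ (by simp [hbl]) ]
                simp [hbl]
              · rw [getD_set', if_neg (by omega), getD_set', if_neg (by omega), hbi i (by omega)]
                rw [List.getD_append _ _ _ _ (by simp [hbl]; omega)])
          (by rw [set_take_succ paths k p (by omega), hbp]
              simp)
        have hremc : (N : Int) - ((k + 1 : Nat) : Int) = ((N : Int) - k) - 1 := by omega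
        rw [hremc] at this
        exact this

lemma foldl_const_id {α β : Type} (l : List β) (x : α) :
    l.foldl (fun a _ => a) x = x := by
  induction l generalizing x <;> simp_all

lemma foldl_inner_id {α : Type} (l : List Int) (cand : α) (C : Int) (hC : C ≤ 0)
    (g : Int → α → Int → α) :
    (l.foldl (fun cd r => (PySem.List.pyRange 0 C 1).foldl (g r) cd) cand) = cand := by
  rw [show PySem.List.pyRange 0 C 1 = [] from PySem.List.pyRange_one_eq_nil (by omega)]
  simp only [List.foldl_nil]
  exact foldl_const_id l cand

lemma toNat_mul_eq (R C : Int) (hR : 0 ≤ R) (hC : 0 ≤ C) :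
    ((R.toNat * C.toNat : Nat) : Int) = R * C := by
  rw [Nat.cast_mul, Int.toNat_of_nonneg hR, Int.toNat_of_nonneg hC]

lemma zero_A (R C : Int) (h : R * C = 0) : Solve R C = "POSSIBLE" := by
  have hRC0 : R.toNat * C.toNat = 0 := by
    rcases mul_eq_zero.mp h with h0 | h0 <;> simp [h0]
  rw [Solve.eq_def]
  dsimp only
  rw [A_init_eq R C, hRC0]
  dsimp only [List.replicate]
  have hfill : ∀ cand : List (List (Int × Int)),
      ((PySem.List.pyRange 0 R 1).foldl (fun cd r =>
        (PySem.List.pyRange 0 C 1).foldl (fun cd c =>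
          PySem.List.pySetD cd 0 (PySem.List.pyGetD cd 0 [] ++ [(r, c)])) cd) cand) = cand := by
    intro cand
    rcases mul_eq_zero.mp h with h0 | h0
    · rw [show PySem.List.pyRange 0 R 1 = [] from PySem.List.pyRange_one_eq_nil (by omega)]
      rfl
    · exact foldl_inner_id _ cand C (by omega) _
  rw [hfill]
  have hfuel : fuelA R C = 2 := by unfold fuelA; rw [h]; rfl
  rw [hfuel, show (2 : Nat) = 1 + 1 from rfl, loopA,
    show ((0 : Int) == R * C) = true from by simp [h.symm]]
  rfl

lemma zero_B (R C : Int) (h : R * C = 0) : Solve_alt R C = "POSSIBLE" := by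
  rw [Solve_alt.eq_def]
  dsimp only
  rw [altPlace, if_pos (le_of_eq h)]
  rfl

lemma mu_init (R C : Int) (N : Nat) (hN : 0 < N) (hlen : (allCells R C).length = N) :
    mu N ((List.replicate N ([] : List (Int × Int))).set 0 (allCells R C)) 0
      = N * (N + 2) ^ N := by
  unfold mu
  rw [Finset.sum_eq_single_of_mem 0 (Finset.mem_range.mpr hN)]
  · rw [getD_set', if_pos ⟨rfl, by simp [hN]⟩, hlen]
    simp [muW]
  · intro i _ hi
    rw [getD_set', if_neg (by omega)]
    simp

lemma link_spec (R C : Int) (N : Nat) (board : List (List Int))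
    (hR : 0 < R) (hC : 0 < C) (hN : (N : Int) = R * C) :
    specLoop R C board [] (allCells R C) ((N : Int))
      = altPlace R C board none (R * C) := by
  rw [specLoop.eq_def]
  dsimp only
  rw [altPlace, if_neg (not_le.mpr (mul_pos hR hC)), freeCells_none, show R * C - 1 = (N : Int) - 1 from by omega]
  cases h : altTry R C board (allCells R C).reverse ((N : Int) - 1) <;> simp


-- ===== VERDICT (by name: the statement is the Claim_ definition above) =====
theorem Solve_spec : Claim_equal_Solve := by
  unfold Claim_equal_Solve Spec_Solve
  intro R C _hdom hpre
  rcases hpre with h0 | ⟨hR, hC⟩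
  · rw [zero_A R C h0, zero_B R C h0]
  · set N := R.toNat * C.toNat with hNdef
    have hNint : ((N : Nat) : Int) = R * C := toNat_mul_eq R C hR.le hC.le
    have hNpos : 0 < N := by
      have : (0 : Int) < R * C := mul_pos hR hC
      omega
    have hRCtoNat : (R * C).toNat = N := by omega
    have hlenAll : (allCells R C).length = N := length_allCells R C
    -- reduce Solve to the initial loop state
    rw [Solve.eq_def]
    dsimp only
    rw [A_init_eq R C]
    dsimp only
    rw [fill_fold_eq R C _ (by rw [List.length_replicate]; exact hNpos)]
    rw [show (List.replicate N ([] : List (Int × Int))).getD 0 [] = [] from by simp]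
    rw [List.nil_append]
    -- apply the simulation at the initial state
    have hμ : mu N ((List.replicate N ([] : List (Int × Int))).set 0 (allCells R C)) 0
        < fuelA R C := by
      rw [mu_init R C N hNpos hlenAll]
      unfold fuelA
      rw [hRCtoNat]
      omega
    have hsim := sim R C N hR hC hNint (fuelA R C) 0
      (List.replicate R.toNat (List.replicate C.toNat (0 : Int)))
      (List.replicate N ((-1 : Int), (-1 : Int)))
      ((List.replicate N ([] : List (Int × Int))).set 0 (allCells R C))
      [] (allCells R C)
      hμ hNpos (dims_board0 R C)
      (by intro p hp
          exact ⟨(mem_allCells R C p).mp hp, getCell_board0 R C p.1 p.2 ((mem_allCells R C p).mp hp)⟩)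
      (by simp) (by simp)
      (by rw [getD_set', if_pos ⟨rfl, by rw [List.length_replicate]; exact hNpos⟩])
      rfl (by omega) rfl
    rw [show ((N : Int) - ((0 : Nat) : Int)) = (N : Int) from by omega,
      link_spec R C N _ hR hC hNint] at hsim
    -- reduce Solve_alt
    rw [Solve_alt.eq_def]
    dsimp only
    rw [B_board_eq R C]
    cases halt : altPlace R C (List.replicate R.toNat (List.replicate C.toNat (0 : Int))) none (R * C) with
    | some t =>
      rw [halt] at hsim
      rw [show ((0 : Nat) : Int) = (0 : Int) from rfl] at hsim
      rw [hsim]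
    | none =>
      rw [halt] at hsim
      obtain ⟨ps, hps⟩ := hsim
      rw [show ((0 : Nat) : Int) = (0 : Int) from rfl] at hps
      rw [hps]
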